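-- pv_equiv track=rewrite | github.com/boriskashentsev/CodeWars | python/6 kyu/Upside down numbers/solution.py | rotatedNumber
-- ===== SOURCE A (Python) =====
-- import math
--
-- def rotatedNumber (n):
--     if n == 0 :
--         return 0
--     number = n
--     result = 0
--     options = {0: 0, 1: 1, 2: -1, 3: -1, 4: -1, 5: -1, 6: 9, 7: -1, 8: 8, 9: 6}
--
--     while number > 0 :
--         part = number % 10
--         if options[part] >= 0 :
--             result = result * 10 + options[part]
--         else :
--             return -1
--         number = math.floor(number / 10)
--     return result
-- ===== SOURCE B (Python) =====
-- # Alternative: string/table based rotation — map each character of str(n) through a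
-- # digit table, then combine with a positional power sum (i-th most significant digit
-- # weighted 10**i, which realises the 180-degree reversal). Non-positive n returns 0 as in A.
-- VAL = {'0': 0, '1': 1, '6': 9, '8': 8, '9': 6}
--
-- def rotatedNumber(n):
--     if n <= 0:
--         return 0
--     digits = [VAL.get(c, -1) for c in str(n)]
--     if -1 in digits:
--         return -1
--     return sum(d * 10**i for i, d in enumerate(digits))
-- ===== Notes on version B (the rewrite author's own statement) =====
-- stated objective: alternative
-- what changed: The arithmetic digit-peeling while-loop with an accumulator is replaced by mapping the characters of str(n) through a rotation table and combining them with a positional power sum (the i-th most significant digit weighted 10**i, which performs the 180-degree reversal).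
import Mathlib
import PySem

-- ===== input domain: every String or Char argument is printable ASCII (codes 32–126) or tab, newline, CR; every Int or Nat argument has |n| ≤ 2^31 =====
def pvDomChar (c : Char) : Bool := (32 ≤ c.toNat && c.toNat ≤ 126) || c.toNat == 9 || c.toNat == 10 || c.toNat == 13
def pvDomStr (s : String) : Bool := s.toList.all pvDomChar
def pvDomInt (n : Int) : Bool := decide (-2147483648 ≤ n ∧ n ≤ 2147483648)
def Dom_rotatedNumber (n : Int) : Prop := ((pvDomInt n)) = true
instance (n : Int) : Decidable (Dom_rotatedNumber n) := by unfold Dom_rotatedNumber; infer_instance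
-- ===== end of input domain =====

-- B replaces A's arithmetic digit-peeling loop by a string/table map plus a positional
-- power sum (objective: alternative, not faster). Non-positive n returns 0, as in A.

-- ===== PORT A =====
-- {0:0, 1:1, 2:-1, 3:-1, 4:-1, 5:-1, 6:9, 7:-1, 8:8, 9:6}
def pvOptionsA : PySem.Dict Int Int :=
  PySem.Dict.ofList [(0, 0), (1, 1), (2, -1), (3, -1), (4, -1), (5, -1), (6, 9), (7, -1), (8, 8), (9, 6)]

-- the while-loop of A; `part` is always in [0,10), so `options[part]` never raises KeyError
-- (total form via getD).  `math.floor(number / 10)` is exactly `number // 10` here: the loop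
-- only runs for 0 < number ≤ 2^31, where float division is too accurate to cross an integer.
def rotLoopA (number result : Int) : Int :=
  if h : 0 < number then
    let part := PySem.Int.mod number 10
    let o := PySem.Dict.getD pvOptionsA part (-1)
    if 0 ≤ o then rotLoopA (PySem.Int.floordiv number 10) (result * 10 + o)
    else -1
  else result
termination_by number.toNat
decreasing_by
  have h10 : PySem.Int.floordiv number 10 = number / 10 :=
    PySem.Int.floordiv_eq_ediv_of_pos (by omega)
  rw [h10]
  omega

def rotatedNumber (n : Int) : Int :=
  if n = 0 then 0 else rotLoopA n 0

-- ===== PORT B =====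
-- {'0': 0, '1': 1, '6': 9, '8': 8, '9': 6}
def pvValB : PySem.Dict Char Int :=
  PySem.Dict.ofList [('0', 0), ('1', 1), ('6', 9), ('8', 8), ('9', 6)]

def rotatedNumber_alt (n : Int) : Int :=
  if n ≤ 0 then 0
  else
    let digits := (PySem.Int.toChars n).map (fun c => PySem.Dict.getD pvValB c (-1))
    if (-1 : Int) ∈ digits then -1
    else (digits.zipIdx.map (fun p => p.1 * (10 : Int) ^ p.2)).sum

-- ===== PRECONDITION & SPEC =====
def Spec_rotatedNumber (n : Int) (out : Int) : Prop := out = rotatedNumber_alt n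
instance (n : Int) (out : Int) : Decidable (Spec_rotatedNumber n out) := by unfold Spec_rotatedNumber; infer_instance

-- ===== CLAIM (what is proved, stated in full; the proofs are below) =====
def Claim_equal_rotatedNumber : Prop := ∀ (n : Int), Dom_rotatedNumber n → Spec_rotatedNumber n (rotatedNumber n)

-- ===== LEMMAS AND PROOFS =====

-- the rotated value of a single decimal digit (A's table, on Nat digits)
def rotN (d : Nat) : Int := PySem.Dict.getD pvOptionsA (↑d) (-1)

theorem rotN_cases (d : Nat) (h : d < 10) : rotN d = -1 ∨ 0 ≤ rotN d := by
  interval_cases d <;> simp [rotN, pvOptionsA, PySem.Dict.getD] <;> decide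

theorem valB_digitChar (d : Nat) (h : d < 10) :
    PySem.Dict.getD pvValB (Nat.digitChar d) (-1) = rotN d := by
  interval_cases d <;> decide

theorem toDigitsCore_digits (f : Nat) : ∀ (m : Nat) (l : List Char), m < f →
    Nat.toDigitsCore 10 f m l =
      (if m = 0 then ['0'] else ((Nat.digits 10 m).map Nat.digitChar).reverse) ++ l := by
  induction f with
  | zero => intro m l hm; omega
  | succ f ih =>
    intro m l hm
    rw [Nat.toDigitsCore]
    by_cases h0 : m = 0
    · subst h0; simp; decide
    · have hml : m / 10 < m := Nat.div_lt_self (by omega) (by omega)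
      rw [if_neg h0, Nat.digits_def' (by omega : 1 < 10) (by omega : 0 < m)]
      by_cases hq : m / 10 = 0
      · rw [if_pos hq]
        simp [hq]
      · rw [if_neg hq, ih (m / 10) _ (by omega)]
        simp [hq]

theorem toChars_pos (m : Nat) (h : 0 < m) :
    PySem.Int.toChars ↑m = ((Nat.digits 10 m).map Nat.digitChar).reverse := by
  rw [PySem.Int.toChars, if_neg (by omega)]
  rw [Int.toNat_natCast]
  rw [show Nat.toDigits 10 m = Nat.toDigitsCore 10 (m + 1) m [] from rfl]
  rw [toDigitsCore_digits (m + 1) m [] (by omega)]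
  simp [h.ne']

theorem loopA_spec (m : Nat) : ∀ (r : Int),
    rotLoopA ↑m r =
      if ∀ d ∈ Nat.digits 10 m, 0 ≤ rotN d then
        (Nat.digits 10 m).foldl (fun a d => a * 10 + rotN d) r
      else -1 := by
  induction m using Nat.strong_induction_on with
  | _ m ih =>
    intro r
    rw [rotLoopA]
    by_cases h0 : 0 < (m : Int)
    · have hm : 0 < m := by omega
      simp only [h0, dif_pos]
      have hmod : PySem.Int.mod (↑m) 10 = ((m % 10 : Nat) : Int) := by
        exact_mod_cast PySem.Int.mod_natCast m 10
      have hdiv : PySem.Int.floordiv (↑m) 10 = ((m / 10 : Nat) : Int) := by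
        exact_mod_cast PySem.Int.floordiv_natCast m 10
      rw [hmod, hdiv]
      rw [Nat.digits_def' (by omega : 1 < 10) hm]
      have hro : PySem.Dict.getD pvOptionsA ((m % 10 : Nat) : Int) (-1) = rotN (m % 10) := rfl
      rw [hro]
      by_cases hgood : 0 ≤ rotN (m % 10)
      · simp only [hgood, if_pos]
        rw [ih (m / 10) (Nat.div_lt_self hm (by omega))]
        simp [hgood]
      · simp only [hgood]
        simp [hgood]
    · have hm : m = 0 := by omega
      subst hm
      simp
def pvSum (es : List Int) : Int := (es.zipIdx.map (fun p => p.1 * (10 : Int) ^ p.2)).sum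

theorem pvSum_shift (es : List Int) : ∀ (k : Nat),
    ((es.zipIdx k).map (fun p => p.1 * (10 : Int) ^ p.2)).sum = 10 ^ k * pvSum es := by
  induction es with
  | nil => intro k; simp [pvSum]
  | cons e es ih =>
    intro k
    simp only [pvSum, List.zipIdx_cons, List.map_cons, List.sum_cons, ih (k + 1), ih 1]
    ring

theorem pvSum_eq_foldl (es : List Int) :
    pvSum es = es.reverse.foldl (fun a d => a * 10 + d) 0 := by
  induction es with
  | nil => simp [pvSum]
  | cons e es ih =>
    have h1 : pvSum (e :: es) = e + 10 * pvSum es := by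
      simp only [pvSum, List.zipIdx_cons, List.map_cons, List.sum_cons, pvSum_shift es 1]
      ring
    rw [h1, ih, List.reverse_cons, List.foldl_append]
    simp only [List.foldl_cons, List.foldl_nil]
    ring

-- ===== VERDICT (by name: the statement is the Claim_ definition above) =====
theorem rotatedNumber_spec : Claim_equal_rotatedNumber := by
  intro n _
  unfold Spec_rotatedNumber rotatedNumber rotatedNumber_alt
  by_cases hpos : 0 < n
  · have hne : n ≠ 0 := by omega
    have hle : ¬ n ≤ 0 := by omega
    rw [if_neg hne, if_neg hle]
    obtain ⟨m, rfl⟩ : ∃ m : Nat, n = ↑m := ⟨n.toNat, by omega⟩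
    have hm : 0 < m := by omega
    rw [toChars_pos m hm, loopA_spec m 0]
    set L := Nat.digits 10 m with hL
    have hlt : ∀ d ∈ L, d < 10 := fun d hd => Nat.digits_lt_base (by omega) hd
    have hmap : (L.map Nat.digitChar).reverse.map (fun c => PySem.Dict.getD pvValB c (-1))
        = (L.map rotN).reverse := by
      rw [← List.map_reverse, List.map_map, ← List.map_reverse]
      apply List.map_congr_left
      intro d hd
      exact valB_digitChar d (hlt d (by simpa using hd))
    rw [hmap]
    by_cases hall : ∀ d ∈ L, 0 ≤ rotN d
    · have hmem : (-1 : Int) ∉ (L.map rotN).reverse := by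
        simp only [List.mem_reverse, List.mem_map]
        rintro ⟨d, hd, hrd⟩
        have := hall d hd
        omega
      rw [if_pos hall, if_neg hmem]
      rw [show ((L.map rotN).reverse.zipIdx.map (fun p => p.1 * (10 : Int) ^ p.2)).sum
            = pvSum ((L.map rotN).reverse) from rfl]
      rw [pvSum_eq_foldl, List.reverse_reverse, List.foldl_map]
    · have hmem : (-1 : Int) ∈ (L.map rotN).reverse := by
        push Not at hall
        obtain ⟨d, hd, hrd⟩ := hall
        have := rotN_cases d (hlt d hd)
        simp only [List.mem_reverse, List.mem_map]
        exact ⟨d, hd, by omega⟩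
      rw [if_neg hall, if_pos hmem]
  · by_cases h0 : n = 0
    · subst h0; simp
    · have hle : n ≤ 0 := by omega
      rw [if_neg h0, rotLoopA, dif_neg hpos, if_pos hle]
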